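-- pv_equiv track=rewrite | github.com/laomb/laomb | tools/fixfmt.py | format_data_dir
-- ===== SOURCE A (Python) =====
-- def format_data_dir(mnemonic: str, rest: str) -> str:
--     if rest.strip() == "": return mnemonic
--     parts=[]; cur=[]; in_sq=in_dq=False
--     for ch in rest:
--         if ch=="'" and not in_dq: in_sq = not in_sq
--         elif ch=='"' and not in_sq: in_dq = not in_dq
--         if ch==',' and not in_sq and not in_dq:
--             parts.append("".join(cur).strip()); cur=[]
--         else: cur.append(ch)
--     if cur: parts.append("".join(cur).strip())
--     return f"{mnemonic} {', '.join(parts)}"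
-- ===== SOURCE B (Python) =====
-- def format_data_dir(mnemonic: str, rest: str) -> str:
--     if rest.strip() == "":
--         return mnemonic
--     groups = []
--     g = None
--     in_sq = in_dq = False
--     for piece in rest.split(','):
--         g = piece if g is None else g + ',' + piece
--         for ch in piece:
--             if ch == "'" and not in_dq:
--                 in_sq = not in_sq
--             elif ch == '"' and not in_sq:
--                 in_dq = not in_dq
--         if not in_sq and not in_dq:
--             groups.append(g)
--             g = None
--     if g is not None:
--         groups.append(g)
--     if groups and groups[-1] == "":
--         groups.pop()
--     return f"{mnemonic} {', '.join(p.strip() for p in groups)}"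
-- ===== Notes on version B (the rewrite author's own statement) =====
-- stated objective: faster
-- what changed: B first splits rest naively on every comma with str.split(',') and then merges adjacent pieces back together while tracking quote state per piece, instead of A's single character-by-character loop that appends each char to a buffer; the trailing raw-empty group is dropped at the end to mirror A's 'if cur' check.
import Mathlib
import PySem

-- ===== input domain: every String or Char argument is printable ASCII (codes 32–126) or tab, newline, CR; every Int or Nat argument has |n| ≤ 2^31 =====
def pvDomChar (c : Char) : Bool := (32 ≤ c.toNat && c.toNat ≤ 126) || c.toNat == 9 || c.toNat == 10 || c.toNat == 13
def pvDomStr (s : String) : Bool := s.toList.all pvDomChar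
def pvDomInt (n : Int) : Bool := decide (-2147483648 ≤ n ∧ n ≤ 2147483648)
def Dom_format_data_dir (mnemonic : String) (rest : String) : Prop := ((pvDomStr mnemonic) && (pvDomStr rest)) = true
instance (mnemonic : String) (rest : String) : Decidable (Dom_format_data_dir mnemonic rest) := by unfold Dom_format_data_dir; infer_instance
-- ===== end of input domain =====

-- B re-splits on every comma with split(',') and merges pieces by quote state, instead of
-- A's single char-by-char buffer loop; same output (objective: alternative decomposition).

-- ===== PORT A =====
-- quote-state toggle shared by both sources (identical rules in A and B)
def pvToggle (sq dq : Bool) (ch : Char) : Bool × Bool :=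
  if ch = '\'' && !dq then (!sq, dq)
  else if ch = '"' && !sq then (sq, !dq)
  else (sq, dq)

-- one iteration of A's `for ch in rest` loop
def pvStepA (st : List (List Char) × List Char × Bool × Bool) (ch : Char) :
    List (List Char) × List Char × Bool × Bool :=
  let sd := pvToggle st.2.2.1 st.2.2.2 ch
  if ch = ',' && !sd.1 && !sd.2 then
    (st.1 ++ [PySem.Chars.strip st.2.1], [], sd.1, sd.2)
  else
    (st.1, st.2.1 ++ [ch], sd.1, sd.2)

-- A's `if cur: parts.append(...)` postlude
def pvFinA (st : List (List Char) × List Char × Bool × Bool) : List (List Char) :=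
  if st.2.1 ≠ [] then st.1 ++ [PySem.Chars.strip st.2.1] else st.1

def format_data_dir (mnemonic : String) (rest : String) : String :=
  if PySem.Str.strip rest = "" then mnemonic
  else
    String.ofList (mnemonic.toList ++ ' ' ::
      PySem.Chars.join [',', ' '] (pvFinA (rest.toList.foldl pvStepA ([], [], false, false))))

-- ===== PORT B =====
-- hand port of rest.split(','): exact for a one-character separator
def pvSplitComma : List Char → List (List Char)
  | [] => [[]]
  | c :: t =>
    if c = ',' then [] :: pvSplitComma t
    else
      match pvSplitComma t with
      | [] => [[c]]
      | g :: gs => (c :: g) :: gs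

-- B's inner `for ch in piece` quote scan
def pvQState (sd : Bool × Bool) (p : List Char) : Bool × Bool :=
  p.foldl (fun s ch => pvToggle s.1 s.2 ch) sd

-- one iteration of B's `for piece in rest.split(',')` loop
def pvStepB (st : List (List Char) × Option (List Char) × Bool × Bool) (p : List Char) :
    List (List Char) × Option (List Char) × Bool × Bool :=
  let g' := match st.2.1 with | none => p | some g => g ++ ',' :: p
  let sd := pvQState (st.2.2.1, st.2.2.2) p
  if !sd.1 && !sd.2 then (st.1 ++ [g'], none, sd.1, sd.2)
  else (st.1, some g', sd.1, sd.2)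

-- B's postlude: flush open group, drop a raw-empty trailing group, strip all groups
def pvFinB (st : List (List Char) × Option (List Char) × Bool × Bool) : List (List Char) :=
  let groups := match st.2.1 with | none => st.1 | some g => st.1 ++ [g]
  let groups := if groups.getLast? = some [] then groups.dropLast else groups
  groups.map PySem.Chars.strip

def format_data_dir_alt (mnemonic : String) (rest : String) : String :=
  if PySem.Str.strip rest = "" then mnemonic
  else
    String.ofList (mnemonic.toList ++ ' ' ::
      PySem.Chars.join [',', ' '] (pvFinB ((pvSplitComma rest.toList).foldl pvStepB ([], none, false, false))))

-- ===== PRECONDITION & SPEC =====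
def Spec_format_data_dir (mnemonic : String) (rest : String) (out : String) : Prop := out = format_data_dir_alt mnemonic rest
instance (mnemonic : String) (rest : String) (out : String) : Decidable (Spec_format_data_dir mnemonic rest out) := by unfold Spec_format_data_dir; infer_instance

-- ===== CLAIM (what is proved, stated in full; the proofs are below) =====
def Claim_equal_format_data_dir : Prop := ∀ (mnemonic : String) (rest : String), Dom_format_data_dir mnemonic rest → Spec_format_data_dir mnemonic rest (format_data_dir mnemonic rest)

-- ===== LEMMAS AND PROOFS =====

-- `cur` in A at a piece boundary: the open group of B plus its pending comma
def pvOptComma : Option (List Char) → List Char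
  | none => []
  | some g => g ++ [',']

-- rejoin pieces with commas (inverse of pvSplitComma)
def pvJoinC : List (List Char) → List Char
  | [] => []
  | [g] => g
  | g :: gs => g ++ ',' :: pvJoinC gs

theorem pvSplitComma_ne_nil (l : List Char) : pvSplitComma l ≠ [] := by
  cases l with
  | nil => simp [pvSplitComma]
  | cons c t =>
    simp only [pvSplitComma]
    split
    · simp
    · cases h : pvSplitComma t <;> simp

theorem pvJoinC_cons_cons (g : List Char) (q : List Char) (gs : List (List Char)) :
    pvJoinC (g :: q :: gs) = g ++ ',' :: pvJoinC (q :: gs) := rfl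

theorem pvJoinC_consHead (c : Char) (g : List Char) (gs : List (List Char)) :
    pvJoinC ((c :: g) :: gs) = c :: pvJoinC (g :: gs) := by
  cases gs <;> simp [pvJoinC]

theorem pvJoinC_splitComma (l : List Char) : pvJoinC (pvSplitComma l) = l := by
  induction l with
  | nil => rfl
  | cons c t ih =>
    obtain ⟨g, gs, hgs⟩ : ∃ g gs, pvSplitComma t = g :: gs := by
      cases h : pvSplitComma t with
      | nil => exact absurd h (pvSplitComma_ne_nil t)
      | cons g gs => exact ⟨g, gs, rfl⟩
    rw [hgs] at ih
    by_cases hc : c = ','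
    · subst hc
      have h1 : pvSplitComma (',' :: t) = [] :: g :: gs := by
        simp [pvSplitComma, hgs]
      rw [h1, pvJoinC_cons_cons, ih]
      rfl
    · have h1 : pvSplitComma (c :: t) = (c :: g) :: gs := by
        simp [pvSplitComma, hc, hgs]
      rw [h1, pvJoinC_consHead, ih]

theorem pvSplitComma_no_comma (l : List Char) :
    ∀ g ∈ pvSplitComma l, ',' ∉ g := by
  induction l with
  | nil => intro g hg; simp [pvSplitComma] at hg; simp [hg]
  | cons c t ih =>
    intro g hg
    obtain ⟨g0, gs, hgs⟩ : ∃ g0 gs, pvSplitComma t = g0 :: gs := by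
      cases h : pvSplitComma t with
      | nil => exact absurd h (pvSplitComma_ne_nil t)
      | cons g0 gs => exact ⟨g0, gs, rfl⟩
    by_cases hc : c = ','
    · subst hc
      have h1 : pvSplitComma (',' :: t) = [] :: pvSplitComma t := by
        simp [pvSplitComma]
      rw [h1] at hg
      rcases List.mem_cons.mp hg with h2 | h2
      · simp [h2]
      · exact ih g h2
    · have h1 : pvSplitComma (c :: t) = (c :: g0) :: gs := by
        simp [pvSplitComma, hc, hgs]
      rw [h1] at hg
      rcases List.mem_cons.mp hg with h2 | h2
      · subst h2
        intro hm
        rcases List.mem_cons.mp hm with h3 | h3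
        · exact hc h3.symm
        · exact ih g0 (hgs ▸ List.mem_cons_self) h3
      · exact ih g (hgs ▸ List.mem_cons_of_mem g0 h2)

-- folding A's step over a comma-free piece: chars append, only the quote state moves
theorem pvFoldA_piece (p : List Char) (hp : ',' ∉ p) :
    ∀ (parts : List (List Char)) (cur : List Char) (sq dq : Bool),
      p.foldl pvStepA (parts, cur, sq, dq)
        = (parts, cur ++ p, (pvQState (sq, dq) p).1, (pvQState (sq, dq) p).2) := by
  induction p with
  | nil => intro parts cur sq dq; simp [pvQState]
  | cons ch t ih =>
    intro parts cur sq dq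
    have hch : ch ≠ ',' := fun h => hp (h ▸ List.mem_cons_self)
    have ht : ',' ∉ t := fun h => hp (List.mem_cons_of_mem ch h)
    simp only [List.foldl_cons]
    have hstep : pvStepA (parts, cur, sq, dq) ch
        = (parts, cur ++ [ch], (pvToggle sq dq ch).1, (pvToggle sq dq ch).2) := by
      simp [pvStepA, hch]
    rw [hstep, ih ht]
    simp [pvQState]

-- B's step, written through pvOptComma
theorem pvStepB_eq (groups : List (List Char)) (gopt : Option (List Char)) (sq dq : Bool)
    (p : List Char) :
    pvStepB (groups, gopt, sq, dq) p =
      if (!(pvQState (sq, dq) p).1 && !(pvQState (sq, dq) p).2) = true then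
        (groups ++ [pvOptComma gopt ++ p], none, (pvQState (sq, dq) p).1, (pvQState (sq, dq) p).2)
      else
        (groups, some (pvOptComma gopt ++ p), (pvQState (sq, dq) p).1, (pvQState (sq, dq) p).2) := by
  cases gopt <;> simp [pvStepB, pvOptComma]

-- the main invariant: A over the rejoined pieces = B over the pieces
theorem pvMain (ps : List (List Char)) :
    ∀ (p : List Char) (groups : List (List Char)) (gopt : Option (List Char)) (sq dq : Bool),
      ',' ∉ p → (∀ q ∈ ps, ',' ∉ q) →
      pvFinA ((pvJoinC (p :: ps)).foldl pvStepA (groups.map PySem.Chars.strip, pvOptComma gopt, sq, dq))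
        = pvFinB ((p :: ps).foldl pvStepB (groups, gopt, sq, dq)) := by
  induction ps with
  | nil =>
    intro p groups gopt sq dq hp _
    have hjoin : pvJoinC [p] = p := rfl
    rw [hjoin, pvFoldA_piece p hp, List.foldl_cons, List.foldl_nil, pvStepB_eq]
    by_cases hbal : (!(pvQState (sq, dq) p).1 && !(pvQState (sq, dq) p).2) = true
    · rw [if_pos hbal]
      by_cases hnil : pvOptComma gopt ++ p = []
      · simp [pvFinA, pvFinB, hnil]
      · simp [pvFinA, pvFinB, hnil]
    · rw [if_neg hbal]
      by_cases hnil : pvOptComma gopt ++ p = []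
      · simp [pvFinA, pvFinB, hnil]
      · simp [pvFinA, pvFinB, hnil]
  | cons q ps' ih =>
    intro p groups gopt sq dq hp hps
    have hq : ',' ∉ q := hps q List.mem_cons_self
    have hps' : ∀ r ∈ ps', ',' ∉ r := fun r hr => hps r (List.mem_cons_of_mem q hr)
    rw [pvJoinC_cons_cons, List.foldl_append, pvFoldA_piece p hp, List.foldl_cons]
    have htog : pvToggle (pvQState (sq, dq) p).1 (pvQState (sq, dq) p).2 ',' =
        ((pvQState (sq, dq) p).1, (pvQState (sq, dq) p).2) := by
      simp [pvToggle]
    by_cases hbal : (!(pvQState (sq, dq) p).1 && !(pvQState (sq, dq) p).2) = true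
    · have hstep : pvStepA (groups.map PySem.Chars.strip, pvOptComma gopt ++ p,
            (pvQState (sq, dq) p).1, (pvQState (sq, dq) p).2) ','
          = (groups.map PySem.Chars.strip ++ [PySem.Chars.strip (pvOptComma gopt ++ p)], [],
            (pvQState (sq, dq) p).1, (pvQState (sq, dq) p).2) := by
        simp only [pvStepA]
        rw [htog]
        simp [hbal]
      rw [hstep, List.foldl_cons, pvStepB_eq, if_pos hbal]
      have := ih q (groups ++ [pvOptComma gopt ++ p]) none
        (pvQState (sq, dq) p).1 (pvQState (sq, dq) p).2 hq hps'
      simpa [pvOptComma] using this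
    · have hstep : pvStepA (groups.map PySem.Chars.strip, pvOptComma gopt ++ p,
            (pvQState (sq, dq) p).1, (pvQState (sq, dq) p).2) ','
          = (groups.map PySem.Chars.strip, (pvOptComma gopt ++ p) ++ [','],
            (pvQState (sq, dq) p).1, (pvQState (sq, dq) p).2) := by
        simp only [pvStepA]
        rw [htog]
        simp [hbal]
      rw [hstep, List.foldl_cons, pvStepB_eq, if_neg hbal]
      have := ih q groups (some (pvOptComma gopt ++ p))
        (pvQState (sq, dq) p).1 (pvQState (sq, dq) p).2 hq hps'
      simpa [pvOptComma] using this

-- ===== VERDICT (by name: the statement is the Claim_ definition above) =====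
theorem format_data_dir_spec : Claim_equal_format_data_dir := by
  intro mnemonic rest _
  unfold Spec_format_data_dir format_data_dir format_data_dir_alt
  by_cases hs : PySem.Str.strip rest = ""
  · rw [if_pos hs, if_pos hs]
  · rw [if_neg hs, if_neg hs]
    obtain ⟨p, ps, hsplit⟩ : ∃ p ps, pvSplitComma rest.toList = p :: ps := by
      cases h : pvSplitComma rest.toList with
      | nil => exact absurd h (pvSplitComma_ne_nil rest.toList)
      | cons p ps => exact ⟨p, ps, rfl⟩
    have hrest : rest.toList = pvJoinC (p :: ps) := by
      rw [← hsplit, pvJoinC_splitComma]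
    have hnc := pvSplitComma_no_comma rest.toList
    rw [hsplit] at hnc
    have hmain := pvMain ps p [] none false false (hnc p List.mem_cons_self)
      (fun q hq => hnc q (List.mem_cons_of_mem p hq))
    simp only [List.map_nil, pvOptComma] at hmain
    rw [hsplit, hrest, hmain]
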